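-- pv_equiv track=rewrite | github.com/xuda1979/papers | ag-qec/simulation.py | cyclotomic_coset_2mod255
-- ===== SOURCE A (Python) =====
-- from typing import List, Tuple
--
-- def cyclotomic_coset_2mod255(a: int) -> List[int]:
--     seen = set()
--     x = a % 255
--     res = []
--     while x not in seen:
--         seen.add(x)
--         res.append(x)
--         x = (2 * x) % 255
--     return res
-- ===== SOURCE B (Python) =====
-- def cyclotomic_coset_2mod255(a: int) -> list:
--     # 255 = 2**8 - 1, so doubling mod 255 is a cyclic LEFT ROTATION of the
--     # 8-bit word.  The coset is therefore the list of rotations of x0, and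
--     # its length is the rotation period of x0, a divisor of 8.  No doubling
--     # loop: check the candidate periods 1, 2, 4 directly, then list the
--     # rotations by closed formula.
--     x0 = a % 255
--
--     def rot(x, d):
--         # rotate the 8-bit word x left by d positions
--         return (x * 2 ** d + x // 2 ** (8 - d)) % 256
--
--     p = 8
--     for d in (1, 2, 4):
--         if rot(x0, d) == x0:
--             p = d
--             break
--     return [rot(x0, i) for i in range(p)]
-- ===== Notes on version B (the rewrite author's own statement) =====
-- stated objective: alternative
-- what changed: B never iterates the doubling map: since 255 = 2^8 - 1, doubling mod 255 is a cyclic rotation of the 8-bit word, so B finds the rotation period p (a divisor of 8, tested directly on the candidates 1,2,4) and emits the p rotations of a%255 by closed formula.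
import Mathlib
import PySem

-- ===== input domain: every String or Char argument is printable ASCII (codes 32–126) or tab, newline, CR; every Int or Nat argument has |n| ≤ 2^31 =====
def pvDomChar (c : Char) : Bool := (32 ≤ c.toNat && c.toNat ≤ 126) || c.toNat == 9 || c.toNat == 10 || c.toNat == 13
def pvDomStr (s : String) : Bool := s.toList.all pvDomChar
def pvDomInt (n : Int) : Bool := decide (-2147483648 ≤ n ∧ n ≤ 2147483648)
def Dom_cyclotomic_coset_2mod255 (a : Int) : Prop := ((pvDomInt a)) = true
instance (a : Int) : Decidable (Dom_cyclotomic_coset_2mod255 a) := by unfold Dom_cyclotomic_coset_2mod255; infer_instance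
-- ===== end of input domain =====

-- B replaces the doubling loop by 8-bit rotations: doubling mod 255 = rotate the 8-bit
-- word, so B computes the rotation period (a divisor of 8) and lists the rotations
-- by closed formula (objective: alternative).

-- ===== PORT A =====
-- A's while loop with the seen-set, as fuel recursion (fuel 256 > number of residues,
-- so it only makes the loop total and is never exhausted).
def pvALoop : Nat → PySem.Set Int → Int → List Int → List Int
  | 0, _, _, res => res
  | fuel + 1, seen, x, res =>
    if PySem.Set.contains seen x then res
    else pvALoop fuel (PySem.Set.add seen x) (PySem.Int.mod (2 * x) 255) (res ++ [x])

def cyclotomic_coset_2mod255 (a : Int) : List Int :=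
  pvALoop 256 PySem.Set.empty (PySem.Int.mod a 255) []

-- ===== PORT B =====
-- Source B's rot(x, d): rotate the 8-bit word x left by d positions
-- (x * 2**d + x // 2**(8-d)) % 256, ported with Python floor-division and mod.
def pvRot (x : Int) (d : Nat) : Int :=
  PySem.Int.mod (x * 2 ^ d + PySem.Int.floordiv x (2 ^ (8 - d))) 256

def cyclotomic_coset_2mod255_alt (a : Int) : List Int :=
  let x0 := PySem.Int.mod a 255
  -- Source B's `for d in (1, 2, 4): if rot(x0,d)==x0: p=d; break` with default p=8
  let p : Nat :=
    if pvRot x0 1 = x0 then 1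
    else if pvRot x0 2 = x0 then 2
    else if pvRot x0 4 = x0 then 4
    else 8
  (List.range p).map (fun i => pvRot x0 i)

-- ===== PRECONDITION & SPEC =====
def Spec_cyclotomic_coset_2mod255 (a : Int) (out : List Int) : Prop := out = cyclotomic_coset_2mod255_alt a
instance (a : Int) (out : List Int) : Decidable (Spec_cyclotomic_coset_2mod255 a out) := by unfold Spec_cyclotomic_coset_2mod255; infer_instance

-- ===== CLAIM (what is proved, stated in full; the proofs are below) =====
def Claim_equal_cyclotomic_coset_2mod255 : Prop := ∀ (a : Int), Dom_cyclotomic_coset_2mod255 a → Spec_cyclotomic_coset_2mod255 a (cyclotomic_coset_2mod255 a)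

-- ===== LEMMAS AND PROOFS =====

-- Both ports depend on a only through r = a % 255 ∈ [0, 255): check the 255 residues by computation.
set_option maxHeartbeats 2000000 in
set_option maxRecDepth 10000 in
theorem pv_residue_check : ∀ n : Nat, n < 255 →
    cyclotomic_coset_2mod255 (n : Int) = cyclotomic_coset_2mod255_alt (n : Int) := by decide

theorem pv_mod_fixed (a : Int) :
    PySem.Int.mod (PySem.Int.mod a 255) 255 = PySem.Int.mod a 255 := by
  have h0 : (0 : Int) ≤ PySem.Int.mod a 255 := PySem.Int.mod_nonneg a (by norm_num)
  have h1 : PySem.Int.mod a 255 < 255 := PySem.Int.mod_lt a (by norm_num)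
  have := PySem.Int.mod_eq_emod_of_pos (a := PySem.Int.mod a 255) (b := 255) (by norm_num)
  rw [this]
  exact Int.emod_eq_of_lt h0 h1

-- ===== VERDICT (by name: the statement is the Claim_ definition above) =====
theorem cyclotomic_coset_2mod255_spec : Claim_equal_cyclotomic_coset_2mod255 := by
  intro a _
  unfold Spec_cyclotomic_coset_2mod255
  have h0 : (0 : Int) ≤ PySem.Int.mod a 255 := PySem.Int.mod_nonneg a (by norm_num)
  have h1 : PySem.Int.mod a 255 < 255 := PySem.Int.mod_lt a (by norm_num)
  have hr : ((PySem.Int.mod a 255).toNat : Int) = PySem.Int.mod a 255 := Int.toNat_of_nonneg h0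
  have hlt : (PySem.Int.mod a 255).toNat < 255 := by omega
  have key := pv_residue_check (PySem.Int.mod a 255).toNat hlt
  rw [hr] at key
  have eA : cyclotomic_coset_2mod255 a = cyclotomic_coset_2mod255 (PySem.Int.mod a 255) := by
    unfold cyclotomic_coset_2mod255; rw [pv_mod_fixed]
  have eB : cyclotomic_coset_2mod255_alt a = cyclotomic_coset_2mod255_alt (PySem.Int.mod a 255) := by
    unfold cyclotomic_coset_2mod255_alt; rw [pv_mod_fixed]
  rw [eA, eB, key]
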